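-- pv_equiv track=rewrite | github.com/Jackieji00/csci1133 | repo-ji000011/lab9.py | rankandSuitCount
-- ===== SOURCE A (Python) =====
-- def rankandSuitCount(alist):
--     ranks= ['2','3', '4','5','6', '7', '8', '9', 'T', \
--             'J', 'Q', 'K', 'A' ]
--     suits= [ 'C', 'S', 'D', 'H' ]
--     rank = {}
--     suit = {}
--     for x in alist:
--         if x[0] in rank:
--             rank[x[0]]+=1
--         elif x[0] in suit:
--             suit[x[0]] += 1
--         elif x[0] in ranks:
--             rank[x[0]] = 1
--         else:
--             suit[x[0]] = 1
--         if x[1] in rank: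
--             rank[x[1]]+=1
--         elif x[1] in suit:
--             suit[x[1]] += 1
--         elif x[1] in ranks:
--             rank[x[1]] = 1
--         else:
--             suit[x[1]] = 1
--     return rank,suit
-- ===== SOURCE B (Python) =====
-- def rankandSuitCount(alist):
--     ranks = {'2', '3', '4', '5', '6', '7', '8', '9', 'T', 'J', 'Q', 'K', 'A'}
--     chars = []
--     for x in alist:
--         chars.append(x[0])
--         chars.append(x[1])
--     counts = {}
--     for c in chars:
--         counts[c] = counts.get(c, 0) + 1
--     rank = {}
--     suit = {}
--     for c, n in counts.items():
--         if c in ranks: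
--             rank[c] = n
--         else:
--             suit[c] = n
--     return rank, suit
-- ===== Notes on version B (the rewrite author's own statement) =====
-- stated objective: simpler
-- what changed: A classifies each of the two card characters on the fly with a four-way branch over two growing dicts; B flattens the cards into a character stream, counts it in one dict pass, and then partitions the counted items into rank and suit dicts by a membership test against a rank set.
import Mathlib
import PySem

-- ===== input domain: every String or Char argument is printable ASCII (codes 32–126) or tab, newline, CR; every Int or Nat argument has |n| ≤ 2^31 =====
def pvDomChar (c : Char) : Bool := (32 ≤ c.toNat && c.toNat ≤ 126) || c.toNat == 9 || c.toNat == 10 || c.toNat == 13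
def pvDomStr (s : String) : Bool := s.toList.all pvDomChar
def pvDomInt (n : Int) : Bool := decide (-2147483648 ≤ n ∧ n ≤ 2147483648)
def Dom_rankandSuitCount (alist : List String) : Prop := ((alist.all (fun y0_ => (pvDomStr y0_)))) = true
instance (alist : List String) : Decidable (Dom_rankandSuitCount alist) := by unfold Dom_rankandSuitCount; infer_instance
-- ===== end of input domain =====

-- B replaces A's four-way per-character branching over two growing dicts by flatten + one counting
-- pass + one partition pass over the counter's items (objective: simpler).
-- Python's one-character strings are modelled as Char during the computation; both ports convert
-- their (Char, Int) items to (String, Int) pairs at return (the type-convention bridge only).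

-- ===== PORT A =====
def pvRanksA : List Char := ['2', '3', '4', '5', '6', '7', '8', '9', 'T', 'J', 'Q', 'K', 'A']
-- (A's local list 'suits' is defined but never read by A's code, so it has no port.)

-- one iteration of A's four-way classification for a single character
def pvClassA (st : PySem.Dict Char Int × PySem.Dict Char Int) (c : Char) :
    PySem.Dict Char Int × PySem.Dict Char Int :=
  if st.1.contains c then (st.1.modify c 0 (· + 1), st.2)
  else if st.2.contains c then (st.1, st.2.modify c 0 (· + 1))
  else if c ∈ pvRanksA then (st.1.insert c 1, st.2)
  else (st.1, st.2.insert c 1)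

def rankandSuitCount (alist : List String) : (List (String × Int)) × (List (String × Int)) :=
  let st := alist.foldl
    (fun st x =>
      pvClassA (pvClassA st (PySem.List.pyGetD x.toList 0 ' ')) (PySem.List.pyGetD x.toList 1 ' '))
    (PySem.Dict.empty, PySem.Dict.empty)
  (st.1.items.map (fun p => (String.ofList [p.1], p.2)),
   st.2.items.map (fun p => (String.ofList [p.1], p.2)))

-- ===== PORT B =====
def pvRanksB : PySem.Set Char :=
  PySem.Set.ofList ['2', '3', '4', '5', '6', '7', '8', '9', 'T', 'J', 'Q', 'K', 'A']

def rankandSuitCount_alt (alist : List String) : (List (String × Int)) × (List (String × Int)) :=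
  let chars := alist.foldl
    (fun acc x => (acc ++ [PySem.List.pyGetD x.toList 0 ' ']) ++ [PySem.List.pyGetD x.toList 1 ' '])
    []
  let counts := chars.foldl (fun d c => d.insert c (d.getD c 0 + 1)) PySem.Dict.empty
  let st := counts.items.foldl
    (fun (st : PySem.Dict Char Int × PySem.Dict Char Int) p =>
      if PySem.Set.contains pvRanksB p.1 then (st.1.insert p.1 p.2, st.2)
      else (st.1, st.2.insert p.1 p.2))
    (PySem.Dict.empty, PySem.Dict.empty)
  (st.1.items.map (fun p => (String.ofList [p.1], p.2)),
   st.2.items.map (fun p => (String.ofList [p.1], p.2)))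

-- ===== PRECONDITION & SPEC =====
-- Pre_ excludes exactly the inputs on which A raises IndexError: a list element shorter than 2 characters.
def Pre_rankandSuitCount (alist : List String) : Prop := ∀ x ∈ alist, 2 ≤ x.toList.length
instance (alist : List String) : Decidable (Pre_rankandSuitCount alist) := by
  unfold Pre_rankandSuitCount; infer_instance

def pvWitness_rankandSuitCount : List String := ["2C", "2H", "?!", "TC"]

def Spec_rankandSuitCount (alist : List String) (out : (List (String × Int)) × (List (String × Int))) : Prop := out = rankandSuitCount_alt alist
instance (alist : List String) (out : (List (String × Int)) × (List (String × Int))) : Decidable (Spec_rankandSuitCount alist out) := by unfold Spec_rankandSuitCount; infer_instance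

-- ===== CLAIM (what is proved, stated in full; the proofs are below) =====
def Claim_equal_rankandSuitCount : Prop := ∀ (alist : List String), Dom_rankandSuitCount alist → Pre_rankandSuitCount alist → Spec_rankandSuitCount alist (rankandSuitCount alist)

-- ===== LEMMAS AND PROOFS =====

-- the rank/suit test as a Bool
def pvIsRank (c : Char) : Bool := decide (c ∈ pvRanksA)

-- the common "increment or create" step both sides reduce to
def pvBump (d : PySem.Dict Char Int) (c : Char) : PySem.Dict Char Int :=
  d.insert c (d.getD c 0 + 1)

-- the flattened character stream
def pvChars (alist : List String) : List Char :=
  alist.flatMap (fun x => [PySem.List.pyGetD x.toList 0 ' ', PySem.List.pyGetD x.toList 1 ' '])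

lemma pvFoldA (alist : List String) (st : PySem.Dict Char Int × PySem.Dict Char Int) :
    alist.foldl
      (fun st x =>
        pvClassA (pvClassA st (PySem.List.pyGetD x.toList 0 ' ')) (PySem.List.pyGetD x.toList 1 ' '))
      st = (pvChars alist).foldl pvClassA st := by
  induction alist generalizing st with
  | nil => rfl
  | cons x xs ih => simp only [pvChars, List.flatMap_cons, List.foldl_cons, List.foldl_append] at ih ⊢; exact ih _

lemma pvFoldB (alist : List String) (acc : List Char) :
    alist.foldl
      (fun acc x => (acc ++ [PySem.List.pyGetD x.toList 0 ' ']) ++ [PySem.List.pyGetD x.toList 1 ' '])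
      acc = acc ++ pvChars alist := by
  induction alist generalizing acc with
  | nil => simp [pvChars]
  | cons x xs ih =>
    simp only [pvChars, List.flatMap_cons, List.foldl_cons] at ih ⊢
    rw [ih]; simp

-- A's classification loop is two independent counting loops over the two filtered streams
lemma pvClassA_split (cs : List Char) (r s : PySem.Dict Char Int)
    (hr : ∀ k, r.contains k = true → pvIsRank k = true)
    (hs : ∀ k, s.contains k = true → pvIsRank k = false) :
    cs.foldl pvClassA (r, s) =
      ((cs.filter pvIsRank).foldl pvBump r, (cs.filter (fun c => !pvIsRank c)).foldl pvBump s) := by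
  induction cs generalizing r s with
  | nil => rfl
  | cons c cs ih =>
    by_cases hp : pvIsRank c = true
    · have hstep : pvClassA (r, s) c = (pvBump r c, s) := by
        unfold pvClassA pvBump
        by_cases hrc : r.contains c = true
        · simp only [hrc, if_true]; rfl
        · have hrc' : r.contains c = false := by simpa using hrc
          have hsc : s.contains c = false := by
            cases h : s.contains c
            · rfl
            · exact absurd (hs c h) (by simp [hp])
          have hcmem : c ∈ pvRanksA := by simpa [pvIsRank] using hp
          simp [hrc', hsc, hcmem, PySem.Dict.getD_of_not_contains r (0 : Int) hrc']
      have hr' : ∀ k, (pvBump r c).contains k = true → pvIsRank k = true := by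
        intro k hk
        rw [pvBump, PySem.Dict.contains_insert] at hk
        rcases Bool.or_eq_true_iff.mp hk with h | h
        · exact (eq_of_beq h) ▸ hp
        · exact hr k h
      rw [List.foldl_cons, hstep, List.filter_cons_of_pos hp,
        List.filter_cons_of_neg (by simp [hp]), List.foldl_cons]
      exact ih (pvBump r c) s hr' hs
    · have hp' : pvIsRank c = false := by simpa using hp
      have hstep : pvClassA (r, s) c = (r, pvBump s c) := by
        unfold pvClassA pvBump
        have hrc : r.contains c = false := by
          cases h : r.contains c
          · rfl
          · exact absurd (hr c h) (by simp [hp'])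
        by_cases hsc : s.contains c = true
        · simp only [hrc, Bool.false_eq_true, if_false, hsc, if_true]; rfl
        · have hsc' : s.contains c = false := by simpa using hsc
          have hcmem : c ∉ pvRanksA := by simpa [pvIsRank] using hp'
          simp [hrc, hsc', hcmem, PySem.Dict.getD_of_not_contains s (0 : Int) hsc']
      have hs' : ∀ k, (pvBump s c).contains k = true → pvIsRank k = false := by
        intro k hk
        rw [pvBump, PySem.Dict.contains_insert] at hk
        rcases Bool.or_eq_true_iff.mp hk with h | h
        · exact (eq_of_beq h) ▸ hp'
        · exact hs k h
      rw [List.foldl_cons, hstep, List.filter_cons_of_neg (by simp [hp']),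
        List.filter_cons_of_pos (by simp [hp']), List.foldl_cons]
      exact ih r (pvBump s c) hr hs'

-- ordered dedup commutes with filter
lemma pvSet_filter (p : Char → Bool) (cs : List Char) :
    PySem.Set.ofList (cs.filter p) = (PySem.Set.ofList cs).filter p := by
  induction cs using List.reverseRecOn with
  | nil => rfl
  | append_singleton xs x ih =>
    by_cases hp : p x = true
    · by_cases hx : x ∈ PySem.Set.ofList xs
      · simp [List.filter_append, hp, PySem.Set.ofList_append_singleton, ih,
          hx, List.mem_filter]
      · simp [List.filter_append, hp, PySem.Set.ofList_append_singleton, ih,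
          hx, List.mem_filter]
    · have hp' : p x = false := by simpa using hp
      by_cases hx : x ∈ PySem.Set.ofList xs
      · simp [List.filter_append, hp', PySem.Set.ofList_append_singleton, ih,
          hx]
      · simp [List.filter_append, hp', PySem.Set.ofList_append_singleton, ih,
          hx]

-- Counter of a filtered stream = filtered Counter items
lemma pvCounter_filter (p : Char → Bool) (cs : List Char) :
    (PySem.Dict.counter (cs.filter p)).items =
      ((PySem.Dict.counter cs).items).filter (fun q => p q.1) := by
  rw [PySem.Dict.items_counter, PySem.Dict.items_counter, List.filter_map, pvSet_filter]
  have hcomp : ((fun q : Char × Int => p q.1) ∘ fun k => (k, (List.count k cs : Int))) = p := rfl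
  rw [hcomp]
  refine List.map_congr_left ?_
  intro k hk
  have hpk : p k = true := (List.mem_filter.mp hk).2
  rw [List.count_filter hpk]

-- the rank test in B's set is A's rank test
lemma pvRanksB_isRank (c : Char) : PySem.Set.contains pvRanksB c = pvIsRank c := by
  have h : (pvRanksB : List Char) = pvRanksA := by decide
  rw [PySem.Set.contains_eq_listContains, h, pvIsRank, List.contains_eq_mem]

-- B's partition loop appends each item to the matching dict
lemma pvPartB (l : List (Char × Int)) (r s : PySem.Dict Char Int)
    (hnd : (l.map Prod.fst).Nodup)
    (hr : ∀ k ∈ l.map Prod.fst, r.contains k = false)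
    (hs : ∀ k ∈ l.map Prod.fst, s.contains k = false) :
    l.foldl
      (fun (st : PySem.Dict Char Int × PySem.Dict Char Int) p =>
        if PySem.Set.contains pvRanksB p.1 then (st.1.insert p.1 p.2, st.2)
        else (st.1, st.2.insert p.1 p.2))
      (r, s) =
      (⟨r.items ++ l.filter (fun q => pvIsRank q.1)⟩,
       ⟨s.items ++ l.filter (fun q => !pvIsRank q.1)⟩) := by
  induction l generalizing r s with
  | nil => simp
  | cons q l ih =>
    simp only [List.map_cons, List.nodup_cons, List.mem_map] at hnd
    have hqr : r.contains q.1 = false := hr q.1 (by simp)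
    have hqs : s.contains q.1 = false := hs q.1 (by simp)
    have hfresh : ∀ (d : PySem.Dict Char Int) (v : Int),
        ∀ k ∈ l.map Prod.fst, (d.insert q.1 v).contains k = (d.contains k) := by
      intro d v k hk
      rw [PySem.Dict.contains_insert]
      have : (k == q.1) = false := by
        rcases List.mem_map.mp hk with ⟨b, hb, rfl⟩
        exact beq_eq_false_iff_ne.mpr (fun h => hnd.1 ⟨b, hb, h⟩)
      simp [this]
    rw [List.foldl_cons]
    by_cases hq : pvIsRank q.1 = true
    · rw [if_pos (by rw [pvRanksB_isRank]; exact hq)]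
      rw [ih (r.insert q.1 q.2) s hnd.2
        (fun k hk => by rw [hfresh r q.2 k hk]; exact hr k (by simp [hk]))
        (fun k hk => hs k (by simp [hk]))]
      rw [PySem.Dict.items_insert_of_not_contains r q.2 hqr]
      simp [hq]
    · have hq' : pvIsRank q.1 = false := by simpa using hq
      rw [if_neg (by rw [pvRanksB_isRank, hq']; simp)]
      rw [ih r (s.insert q.1 q.2) hnd.2
        (fun k hk => hr k (by simp [hk]))
        (fun k hk => by rw [hfresh s q.2 k hk]; exact hs k (by simp [hk]))]
      rw [PySem.Dict.items_insert_of_not_contains s q.2 hqs]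
      simp [hq']

-- ===== VERDICT (by name: the statement is the Claim_ definition above) =====
theorem rankandSuitCount_spec : Claim_equal_rankandSuitCount := by
  intro alist _ _
  unfold Spec_rankandSuitCount rankandSuitCount rankandSuitCount_alt
  rw [pvFoldA, pvFoldB]
  rw [pvClassA_split (pvChars alist) PySem.Dict.empty PySem.Dict.empty
    (fun k hk => by simp [PySem.Dict.contains_empty] at hk)
    (fun k hk => by simp [PySem.Dict.contains_empty] at hk)]
  have hcounter : ∀ cs : List Char,
      cs.foldl pvBump PySem.Dict.empty = PySem.Dict.counter cs := fun cs =>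
    PySem.Dict.foldl_insert_getD_add_one_eq_counter cs
  rw [hcounter, hcounter]
  simp only [List.nil_append]
  rw [PySem.Dict.foldl_insert_getD_add_one_eq_counter (pvChars alist)]
  have hnd : (((PySem.Dict.counter (pvChars alist)).items).map Prod.fst).Nodup :=
    PySem.Dict.nodup_keys_counter (pvChars alist)
  rw [pvPartB _ PySem.Dict.empty PySem.Dict.empty hnd
    (fun k _ => PySem.Dict.contains_empty k) (fun k _ => PySem.Dict.contains_empty k)]
  have h1 : PySem.Dict.counter ((pvChars alist).filter pvIsRank) =
      (⟨(PySem.Dict.empty : PySem.Dict Char Int).items ++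
        ((PySem.Dict.counter (pvChars alist)).items).filter (fun q => pvIsRank q.1)⟩ :
        PySem.Dict Char Int) := by
    apply PySem.Dict.ext; simpa using pvCounter_filter pvIsRank (pvChars alist)
  have h2 : PySem.Dict.counter ((pvChars alist).filter (fun c => !pvIsRank c)) =
      (⟨(PySem.Dict.empty : PySem.Dict Char Int).items ++
        ((PySem.Dict.counter (pvChars alist)).items).filter (fun q => !pvIsRank q.1)⟩ :
        PySem.Dict Char Int) := by
    apply PySem.Dict.ext; simpa using pvCounter_filter (fun c => !pvIsRank c) (pvChars alist)
  rw [h1, h2]
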